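-- pv_equiv track=rewrite | github.com/Ascendral/KlomboAGI | klomboagi/reasoning/arc_dsl_v2.py | split_by_horizontal_divider
-- ===== SOURCE A (Python) =====
-- from collections import Counter
--
-- Grid = list[list[int]]
--
-- def get_bg(grid: Grid) -> int:
--     """Most common color = background."""
--     flat = [c for row in grid for c in row]
--     return Counter(flat).most_common(1)[0][0] if flat else 0
--
-- def split_by_horizontal_divider(grid: Grid) -> list[Grid]:
--     """Split grid at horizontal divider lines (rows of single color)."""
--     bg = get_bg(grid)
--     rows = len(grid)
--     dividers = []
--     for r in range(rows):
--         vals = set(grid[r])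
--         if len(vals) == 1 and grid[r][0] != bg:
--             dividers.append(r)
--     if not dividers:
--         return [grid]
--     # Split between dividers
--     parts = []
--     prev = 0
--     for d in dividers:
--         if d > prev:
--             parts.append(grid[prev:d])
--         prev = d + 1
--     if prev < rows:
--         parts.append(grid[prev:])
--     return [p for p in parts if p]
-- ===== SOURCE B (Python) =====
-- from collections import Counter
--
-- Grid = list[list[int]]
--
-- def get_bg(grid: Grid) -> int:
--     """Most common color = background."""
--     flat = [c for row in grid for c in row]
--     return Counter(flat).most_common(1)[0][0] if flat else 0
--
-- def split_by_horizontal_divider(grid: Grid) -> list[Grid]: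
--     """Single pass: group consecutive non-divider rows, dropping divider rows."""
--     bg = get_bg(grid)
--     parts: list[Grid] = []
--     cur: Grid = []
--     saw = False
--     for row in grid:
--         if len(set(row)) == 1 and row[0] != bg:
--             saw = True
--             if cur:
--                 parts.append(cur)
--                 cur = []
--         else:
--             cur.append(row)
--     if cur:
--         parts.append(cur)
--     return parts if saw else [grid]
-- ===== Notes on version B (the rewrite author's own statement) =====
-- stated objective: simpler
-- what changed: A first collects divider row indices in one pass and then slices the grid between consecutive indices with bookkeeping of a prev pointer plus a final filter of empty parts; B makes one pass over the rows, accumulating the current run of non-divider rows and emitting it whenever a divider row is hit, with no index arithmetic, no slicing and no filtering.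
import Mathlib
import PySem

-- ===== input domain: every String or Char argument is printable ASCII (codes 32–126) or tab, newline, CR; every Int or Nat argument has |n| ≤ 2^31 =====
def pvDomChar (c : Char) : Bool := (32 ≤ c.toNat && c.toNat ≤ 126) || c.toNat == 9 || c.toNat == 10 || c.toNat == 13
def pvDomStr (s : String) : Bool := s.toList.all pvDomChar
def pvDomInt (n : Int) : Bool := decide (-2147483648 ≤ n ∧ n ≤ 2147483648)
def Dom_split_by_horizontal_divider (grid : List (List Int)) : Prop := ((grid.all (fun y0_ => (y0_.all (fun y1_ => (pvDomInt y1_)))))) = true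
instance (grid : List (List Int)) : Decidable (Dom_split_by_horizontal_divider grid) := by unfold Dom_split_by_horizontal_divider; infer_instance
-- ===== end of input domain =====

-- B replaces A's divider-index collection + slicing-between-indices + empty-part filter by a single
-- pass that accumulates the current run of non-divider rows (objective: simpler).

-- ===== PORT A =====
-- helper get_bg, shared module helper (identical in Source A and Source B):
-- most_common(1)[0][0] ported as head of the stable reverse sort of the counter's items by count;
-- the [0] index is guarded by 'flat ≠ []' exactly as in Python.
def get_bg (grid : List (List Int)) : Int :=
  let flat := grid.flatMap (fun row => row)
  if flat = [] then 0
  else ((PySem.List.sorted (PySem.Dict.counter flat).items (fun kv => kv.2) true).headI).1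

-- port of A: collect divider indices, then slice between consecutive indices, filter empties.
-- grid[r] and grid[r][0] are in range when reached (r from range(rows); the length-1 test guards [0]),
-- so pyGetD with a default is exact there.
def split_by_horizontal_divider (grid : List (List Int)) : List (List (List Int)) :=
  let bg := get_bg grid
  let rows : Int := (grid.length : Int)
  let dividers : List Int := (PySem.List.pyRange 0 rows).foldl (fun ds r =>
      if PySem.Set.len (PySem.Set.ofList (PySem.List.pyGetD grid r [])) == 1 &&
         !(PySem.List.pyGetD (PySem.List.pyGetD grid r []) 0 0 == bg)
      then ds ++ [r] else ds) []
  if dividers = [] then [grid]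
  else
    let pp := dividers.foldl (fun (pp : List (List (List Int)) × Int) d =>
        if d > pp.2 then (pp.1 ++ [PySem.List.slice grid (some pp.2) (some d)], d + 1)
        else (pp.1, d + 1)) ([], 0)
    let parts := if pp.2 < rows then pp.1 ++ [PySem.List.slice grid (some pp.2) none] else pp.1
    parts.filter (fun p => decide (p ≠ []))

-- ===== PORT B =====
-- port of B: one pass with state (parts, cur, saw); cur is the current run of non-divider rows.
def split_by_horizontal_divider_alt (grid : List (List Int)) : List (List (List Int)) :=
  let bg := get_bg grid
  let st := grid.foldl (fun (st : List (List (List Int)) × List (List Int) × Bool) row =>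
      if PySem.Set.len (PySem.Set.ofList row) == 1 && !(PySem.List.pyGetD row 0 0 == bg) then
        (if st.2.1 = [] then (st.1, [], true) else (st.1 ++ [st.2.1], [], true))
      else (st.1, st.2.1 ++ [row], st.2.2)) ([], [], false)
  let parts := if st.2.1 = [] then st.1 else st.1 ++ [st.2.1]
  if st.2.2 then parts else [grid]

-- ===== PRECONDITION & SPEC =====
def Spec_split_by_horizontal_divider (grid : List (List Int)) (out : List (List (List Int))) : Prop := out = split_by_horizontal_divider_alt grid
instance (grid : List (List Int)) (out : List (List (List Int))) : Decidable (Spec_split_by_horizontal_divider grid out) := by unfold Spec_split_by_horizontal_divider; infer_instance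

-- ===== CLAIM (what is proved, stated in full; the proofs are below) =====
def Claim_equal_split_by_horizontal_divider : Prop := ∀ (grid : List (List Int)), Dom_split_by_horizontal_divider grid → Spec_split_by_horizontal_divider grid (split_by_horizontal_divider grid)

-- ===== LEMMAS AND PROOFS =====

-- the divider test both programs apply to a row
def pdiv (bg : Int) (row : List Int) : Bool :=
  PySem.Set.len (PySem.Set.ofList row) == 1 && !(PySem.List.pyGetD row 0 0 == bg)

-- reference function: the runs of non-divider rows (cur = run accumulated so far)
def totRuns (bg : Int) (cur : List (List Int)) : List (List Int) → List (List (List Int))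
  | [] => if cur = [] then [] else [cur]
  | r :: rs => if pdiv bg r then (if cur = [] then [] else [cur]) ++ totRuns bg [] rs
               else totRuns bg (cur ++ [r]) rs

-- A's slicing pipeline on Nat divider indices
def hN (grid : List (List Int)) (prev : Nat) : List Nat → List (List (List Int))
  | [] => if prev < grid.length then [grid.drop prev] else []
  | d :: ds => (if prev < d then [(grid.drop prev).take (d - prev)] else []) ++ hN grid (d + 1) ds

-- A's divider indices, as Nats
def divIdxN (bg : Int) (grid : List (List Int)) : List Nat :=
  (List.range grid.length).filter (fun r => pdiv bg (grid.getD r []))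

theorem divIdxN_nil (bg : Int) : divIdxN bg [] = [] := rfl

theorem divIdxN_cons (bg : Int) (r : List Int) (rs : List (List Int)) :
    divIdxN bg (r :: rs) =
      (if pdiv bg r then [0] else []) ++ (divIdxN bg rs).map (· + 1) := by
  unfold divIdxN
  rw [show (r :: rs).length = rs.length + 1 from rfl, List.range_succ_eq_map]
  simp only [List.filter_cons, List.getD_cons_zero]
  rw [List.filter_map]
  split <;> simp [Function.comp_def, Nat.succ_eq_add_one]

-- B's fold: parts/cur/saw invariant
theorem B_fold (bg : Int) (l : List (List Int)) :
    ∀ (parts : List (List (List Int))) (cur : List (List Int)) (saw : Bool),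
    (let st := l.foldl (fun (st : List (List (List Int)) × List (List Int) × Bool) row =>
        if pdiv bg row then
          (if st.2.1 = [] then (st.1, [], true) else (st.1 ++ [st.2.1], [], true))
        else (st.1, st.2.1 ++ [row], st.2.2)) (parts, cur, saw);
      (if st.2.1 = [] then st.1 else st.1 ++ [st.2.1]) = parts ++ totRuns bg cur l ∧
      st.2.2 = (saw || l.any (pdiv bg))) := by
  induction l with
  | nil => intro parts cur saw; constructor
           · simp only [List.foldl_nil, totRuns]; split <;> simp_all
           · simp
  | cons r rs ih =>
    intro parts cur saw
    simp only [List.foldl_cons, List.any_cons, totRuns]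
    by_cases hp : pdiv bg r
    · simp only [hp, if_true, Bool.true_or]
      by_cases hc : cur = []
      · simpa [hc] using ih parts [] true
      · rw [if_neg hc]
        have h2 := ih (parts ++ [cur]) [] true
        simp only at h2
        refine ⟨?_, by simp [h2.2]⟩
        rw [h2.1]
        simp [hc]
    · simp only [hp, Bool.false_or]
      exact ih parts (cur ++ [r]) saw

-- A's fold over divider indices + final slice = hN
theorem A_pipe (grid : List (List Int)) (ds : List Nat) :
    ∀ (parts : List (List (List Int))) (prev : Nat),
    (let pp := (List.map (Nat.cast : Nat → Int) ds).foldl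
        (fun (pp : List (List (List Int)) × Int) d =>
          if d > pp.2 then (pp.1 ++ [PySem.List.slice grid (some pp.2) (some d)], d + 1)
          else (pp.1, d + 1)) (parts, (prev : Int));
      (if pp.2 < (grid.length : Int) then pp.1 ++ [PySem.List.slice grid (some pp.2) none] else pp.1))
    = parts ++ hN grid prev ds := by
  induction ds with
  | nil =>
    intro parts prev
    simp only [List.map_nil, List.foldl_nil, hN]
    rw [PySem.List.slice_from_natCast]
    by_cases h : prev < grid.length
    · rw [if_pos (show (prev : Int) < (grid.length : Int) from by exact_mod_cast h), if_pos h]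
    · rw [if_neg (show ¬ (prev : Int) < (grid.length : Int) from by exact_mod_cast h), if_neg h]
      simp
  | cons d ds ih =>
    intro parts prev
    have hcast : ((d : Int) + 1) = ((d + 1 : Nat) : Int) := by push_cast; ring
    simp only [List.map_cons, List.foldl_cons]
    by_cases h : prev < d
    · have hgt : (d : Int) > (prev : Int) := by exact_mod_cast h
      rw [if_pos hgt, PySem.List.slice_natCast, hcast]
      have hih := ih (parts ++ [(grid.drop prev).take (d - prev)]) (d + 1)
      simp only at hih
      rw [hih]
      simp [hN, h]
    · have hgt : ¬ ((d : Int) > (prev : Int)) := by exact_mod_cast h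
      rw [if_neg hgt, hcast]
      have hih := ih parts (d + 1)
      simp only at hih
      rw [hih]
      simp [hN, h]

-- shifting hN past a fixed prefix
theorem hN_shift (pre l : List (List Int)) (ds : List Nat) :
    ∀ (prev : Nat),
    hN (pre ++ l) (prev + pre.length) (ds.map (· + pre.length)) = hN l prev ds := by
  induction ds with
  | nil =>
    intro prev
    simp only [List.map_nil, hN, List.length_append]
    have hd : (pre ++ l).drop (prev + pre.length) = l.drop prev := by
      rw [Nat.add_comm, List.drop_length_add_append]
    by_cases h : prev < l.length
    · rw [if_pos (by omega), if_pos h, hd]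
    · rw [if_neg (by omega), if_neg h]
  | cons d ds ih =>
    intro prev
    simp only [List.map_cons, hN]
    have hd : (pre ++ l).drop (prev + pre.length) = l.drop prev := by
      rw [Nat.add_comm, List.drop_length_add_append]
    have harith : d + pre.length + 1 = (d + 1) + pre.length := by omega
    rw [harith, ih (d + 1)]
    by_cases h : prev < d
    · rw [if_pos (by omega), if_pos h, hd]
      congr 3
      omega
    · rw [if_neg (by omega), if_neg h]

-- bridge: the runs of non-divider rows are exactly A's slices between divider indices
theorem bridge (bg : Int) (l : List (List Int)) :
    ∀ (cur : List (List Int)),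
    totRuns bg cur l = hN (cur ++ l) 0 ((divIdxN bg l).map (· + cur.length)) := by
  induction l with
  | nil =>
    intro cur
    simp only [totRuns, divIdxN_nil, List.map_nil, hN, List.append_nil, List.drop_zero]
    by_cases hc : cur = []
    · simp [hc]
    · rw [if_neg hc, if_pos (by cases cur <;> simp_all)]
  | cons r rs ih =>
    intro cur
    rw [divIdxN_cons]
    by_cases hp : pdiv bg r
    · have hds : ((if pdiv bg r then [0] else []) ++ (divIdxN bg rs).map (· + 1)).map (· + cur.length)
          = cur.length :: (divIdxN bg rs).map (· + (cur.length + 1)) := by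
        simp only [hp, if_true, List.map_cons, List.map_map,
          List.cons_append, List.nil_append, Nat.zero_add]
        congr 1
        apply List.map_congr_left
        intro x _
        simp [Function.comp]
        omega
      rw [hds]
      have hshift : hN (cur ++ r :: rs) (0 + (cur ++ [r]).length)
            ((divIdxN bg rs).map (· + (cur ++ [r]).length)) = hN rs 0 (divIdxN bg rs) := by
        have := hN_shift (cur ++ [r]) rs (divIdxN bg rs) 0
        simpa using this
      simp only [List.length_append, List.length_cons, List.length_nil, Nat.zero_add] at hshift
      simp only [totRuns, hp, if_true, hN]
      have hrs : totRuns bg [] rs = hN rs 0 (divIdxN bg rs) := by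
        simpa using ih []
      by_cases hc : cur = []
      · subst hc
        simp only [List.nil_append, List.length_nil, Nat.lt_irrefl, if_false]
        rw [hrs]
        simpa using hshift.symm
      · rw [if_neg hc, if_pos (by cases cur <;> simp_all), hrs, ← hshift]
        simp
    · have hds : ((if pdiv bg r then [0] else []) ++ (divIdxN bg rs).map (· + 1)).map (· + cur.length)
          = (divIdxN bg rs).map (· + (cur.length + 1)) := by
        simp only [hp, Bool.false_eq_true, if_false, List.nil_append, List.map_map]
        apply List.map_congr_left
        intro x _
        simp [Function.comp]
        omega
      rw [hds]
      simp only [totRuns, hp]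
      rw [ih (cur ++ [r])]
      simp

-- every part produced by hN is nonempty (divider indices are < grid.length)
theorem hN_ne (grid : List (List Int)) (ds : List Nat) :
    ∀ (prev : Nat), (∀ d ∈ ds, d < grid.length) →
    ∀ x ∈ hN grid prev ds, x ≠ [] := by
  induction ds with
  | nil =>
    intro prev _ x hx
    simp only [hN] at hx
    split at hx
    · rename_i h
      simp only [List.mem_singleton] at hx
      subst hx
      intro hnil
      have := List.length_drop (l := grid) (i := prev)
      rw [hnil] at this
      simp at this
      omega
    · simp at hx
  | cons d ds ih =>
    intro prev hds x hx
    simp only [hN, List.mem_append] at hx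
    rcases hx with hx | hx
    · have hdl : d < grid.length := hds d (by simp)
      split at hx
      · rename_i h
        simp only [List.mem_singleton] at hx
        subst hx
        intro hnil
        have hlen := congrArg List.length hnil
        simp only [List.length_take, List.length_drop, List.length_nil] at hlen
        omega
      · simp at hx
    · exact ih (d + 1) (fun e he => hds e (by simp [he])) x hx

-- divIdxN is empty iff no row is a divider
theorem divIdxN_empty_iff (bg : Int) (l : List (List Int)) :
    divIdxN bg l = [] ↔ l.any (pdiv bg) = false := by
  induction l with
  | nil => simp [divIdxN_nil]
  | cons r rs ih =>
    rw [divIdxN_cons]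
    by_cases hp : pdiv bg r <;> simp [hp, ih]

-- the collected dividers of A are the Nat divider indices, cast to Int
theorem dividers_eq (bg : Int) (grid : List (List Int)) :
    (PySem.List.pyRange 0 (grid.length : Int)).foldl
      (fun ds r => if pdiv bg (PySem.List.pyGetD grid r []) then ds ++ [r] else ds) []
    = List.map (Nat.cast : Nat → Int) (divIdxN bg grid) := by
  rw [PySem.List.pyRange_zero_natCast, PySem.List.foldl_append_if, List.filter_map]
  simp only [List.nil_append, List.map_id']
  have hf : List.filter ((fun r => pdiv bg (PySem.List.pyGetD grid r [])) ∘ fun (k : Nat) => (k : Int))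
      (List.range grid.length) = divIdxN bg grid := by
    unfold divIdxN
    apply List.filter_congr
    intro x hx
    simp [PySem.List.pyGetD_natCast]
  rw [hf]

-- the two port bodies, with the row test written via pdiv (definitionally equal to the ports)
theorem main_eq (grid : List (List Int)) :
    (let bg := get_bg grid
     let rows : Int := (grid.length : Int)
     let dividers : List Int := (PySem.List.pyRange 0 rows).foldl
        (fun ds r => if pdiv bg (PySem.List.pyGetD grid r []) then ds ++ [r] else ds) []
     if dividers = [] then [grid]
     else
       let pp := dividers.foldl (fun (pp : List (List (List Int)) × Int) d =>
           if d > pp.2 then (pp.1 ++ [PySem.List.slice grid (some pp.2) (some d)], d + 1)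
           else (pp.1, d + 1)) ([], 0)
       let parts := if pp.2 < rows then pp.1 ++ [PySem.List.slice grid (some pp.2) none] else pp.1
       parts.filter (fun p => decide (p ≠ [])))
    = (let bg := get_bg grid
       let st := grid.foldl (fun (st : List (List (List Int)) × List (List Int) × Bool) row =>
           if pdiv bg row then
             (if st.2.1 = [] then (st.1, [], true) else (st.1 ++ [st.2.1], [], true))
           else (st.1, st.2.1 ++ [row], st.2.2)) ([], [], false)
       let parts := if st.2.1 = [] then st.1 else st.1 ++ [st.2.1]
       if st.2.2 then parts else [grid]) := by
  simp only [dividers_eq]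
  have hB := B_fold (get_bg grid) grid [] [] false
  simp only at hB
  by_cases h : divIdxN (get_bg grid) grid = []
  · -- no dividers: both return [grid]
    rw [h]
    simp only [List.map_nil, if_pos]
    rw [hB.2, (divIdxN_empty_iff _ _).mp h]
    simp
  · -- dividers exist
    rw [if_neg (by simpa using h)]
    have hA := A_pipe grid (divIdxN (get_bg grid) grid) [] 0
    simp only [Nat.cast_zero, List.nil_append] at hA
    rw [hA]
    have hfil : (hN grid 0 (divIdxN (get_bg grid) grid)).filter (fun p => decide (p ≠ [])) =
        hN grid 0 (divIdxN (get_bg grid) grid) := by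
      rw [List.filter_eq_self]
      intro x hx
      have hb : ∀ d ∈ divIdxN (get_bg grid) grid, d < grid.length := by
        intro d hd
        unfold divIdxN at hd
        have := List.mem_filter.mp hd
        exact List.mem_range.mp this.1
      simpa using hN_ne grid (divIdxN (get_bg grid) grid) 0 hb x hx
    rw [hfil]
    have hbr := bridge (get_bg grid) grid []
    simp only [List.nil_append, List.length_nil, Nat.add_zero, List.map_id'] at hbr
    have hsaw : grid.any (pdiv (get_bg grid)) = true := by
      by_contra hc
      exact h ((divIdxN_empty_iff _ _).mpr (by simpa using hc))
    rw [hB.2]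
    simp only [hsaw, Bool.false_or, if_pos]
    rw [hB.1, hbr]
    simp

-- ===== VERDICT (by name: the statement is the Claim_ definition above) =====
theorem split_by_horizontal_divider_spec : Claim_equal_split_by_horizontal_divider := by
  unfold Claim_equal_split_by_horizontal_divider
  intro grid _
  unfold Spec_split_by_horizontal_divider
  exact main_eq grid
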